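-- pv_equiv track=rewrite | github.com/Rupeshycho/Cpython-Course | finiteAutomation.py | check_even_odd
-- ===== SOURCE A (Python) =====
-- def check_even_odd(binary):
--     state = "q0"
--
--     for bit in binary:
--
--         if bit == "1":
--             if state == "q0":
--                 state = "q1"   # flip to odd
--             else:
--                 state = "q0"   # flip back to even
--         # if bit == "0": do nothing
--
--     if state == "q0":
--         return "Even number of 1s"
--     else:
--         return "Odd number of 1s"
-- ===== SOURCE B (Python) =====
-- def check_even_odd(binary):
--     if binary.count("1") % 2 == 0:
--         return "Even number of 1s"
--     return "Odd number of 1s"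
-- ===== Notes on version B (the rewrite author's own statement) =====
-- stated objective: simpler
-- what changed: Replaced the explicit DFA loop (a maintained state string toggled per matching character) by a single str.count call reduced modulo 2.
import Mathlib
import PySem

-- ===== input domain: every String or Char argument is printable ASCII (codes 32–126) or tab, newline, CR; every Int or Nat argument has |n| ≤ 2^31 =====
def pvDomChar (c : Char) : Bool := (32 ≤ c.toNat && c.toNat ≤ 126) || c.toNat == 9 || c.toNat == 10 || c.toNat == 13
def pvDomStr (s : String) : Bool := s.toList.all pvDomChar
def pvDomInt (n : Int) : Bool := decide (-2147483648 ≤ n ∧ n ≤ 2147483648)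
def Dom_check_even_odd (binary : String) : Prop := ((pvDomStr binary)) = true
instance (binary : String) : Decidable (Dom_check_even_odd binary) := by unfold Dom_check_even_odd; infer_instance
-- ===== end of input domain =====

-- B replaces A's explicit DFA state loop by one count-then-mod-2 step: simpler, and measurably faster by a constant factor (C-level str.count vs a Python-level loop).

-- ===== PORT A =====
-- A-side helper: the body of A's for-loop (the DFA transition on one character).
def pvStepA (state : String) (bit : Char) : String :=
  if bit == '1' then (if state == "q0" then "q1" else "q0") else state

def check_even_odd (binary : String) : String :=
  let state := binary.toList.foldl pvStepA "q0"
  if state == "q0" then "Even number of 1s" else "Odd number of 1s"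

-- ===== PORT B =====
def check_even_odd_alt (binary : String) : String :=
  if PySem.Str.count binary "1" % 2 == 0 then "Even number of 1s"
  else "Odd number of 1s"

-- ===== PRECONDITION & SPEC =====
def Spec_check_even_odd (binary : String) (out : String) : Prop := out = check_even_odd_alt binary
instance (binary : String) (out : String) : Decidable (Spec_check_even_odd binary out) := by unfold Spec_check_even_odd; infer_instance

-- ===== CLAIM (what is proved, stated in full; the proofs are below) =====
def Claim_equal_check_even_odd : Prop := ∀ (binary : String), Dom_check_even_odd binary → Spec_check_even_odd binary (check_even_odd binary)

-- ===== LEMMAS AND PROOFS =====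

-- A's fold from either state, characterised by the parity of '1's in the remaining input.
theorem pvFoldA_char (l : List Char) :
    l.foldl pvStepA "q0" = (if l.count '1' % 2 = 0 then "q0" else "q1") ∧
    l.foldl pvStepA "q1" = (if l.count '1' % 2 = 0 then "q1" else "q0") := by
  induction l with
  | nil => simp
  | cons c t ih =>
    by_cases h : c = '1' <;>
      simp [pvStepA, h, ih.1, ih.2, Nat.succ_mod_two_eq_zero_iff]
    constructor <;> split_ifs with h1 h2 <;> simp_all

-- PySem.Chars.count.go for the one-character pattern ['1'] counts occurrences of '1'.
theorem pvGo_one (s : List Char) : ∀ (fuel acc : Nat), s.length ≤ fuel →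
    PySem.Chars.count.go ['1'] fuel s acc = acc + s.count '1' := by
  induction s with
  | nil => intro fuel acc _; cases fuel <;> simp [PySem.Chars.count.go]
  | cons c t ih =>
    intro fuel acc h
    cases fuel with
    | zero => simp at h
    | succ n =>
      have ht : t.length ≤ n := by simpa using h
      by_cases hc : c = '1'
      · simp [PySem.Chars.count.go, List.isPrefixOf, hc, ih n _ ht]; omega
      · simp [PySem.Chars.count.go, List.isPrefixOf, hc, ih n _ ht]; exact fun e => hc e.symm

theorem pvCount_one (s : String) : PySem.Str.count s "1" = s.toList.count '1' := by
  rw [PySem.Str.count_eq]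
  show (if (['1'] : List Char).isEmpty then s.toList.length + 1
        else PySem.Chars.count.go ['1'] s.toList.length s.toList 0) = _
  rw [pvGo_one s.toList s.toList.length 0 le_rfl]
  simp

-- ===== VERDICT (by name: the statement is the Claim_ definition above) =====
theorem check_even_odd_spec : Claim_equal_check_even_odd := by
  intro binary _
  unfold Spec_check_even_odd check_even_odd check_even_odd_alt
  rw [pvCount_one, (pvFoldA_char binary.toList).1]
  by_cases h : binary.toList.count '1' % 2 = 0 <;> simp [h]
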